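-- pv_equiv track=rewrite | github.com/Cybok06/nagonu_updated | order_status.py | _compute_order_status_from_items
-- ===== SOURCE A (Python) =====
-- from typing import Any, Dict, List, Optional, Tuple
--
-- FINAL_STATUS = "completed"
--
-- def _compute_order_status_from_items(items: List[Dict[str, Any]], current_status: str | None = None) -> str:
--     if (current_status or "").lower() == FINAL_STATUS:
--         return FINAL_STATUS
--     statuses = [str(i.get("line_status") or "").lower() for i in items]
--     if not statuses:
--         return "processing"
--
--     if all(s == "completed" for s in statuses):
--         return "completed"
--
--     if any(s == "processing" for s in statuses):
--         return "processing"
--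
--     if all(s == "failed" for s in statuses):
--         return "failed"
--
--     # mixed / unknown -> keep as processing for safety
--     return "processing"
-- ===== SOURCE B (Python) =====
-- from typing import Any, Dict, List, Optional, Tuple
--
-- FINAL_STATUS = "completed"
--
-- def _compute_order_status_from_items(items: List[Dict[str, Any]], current_status: str | None = None) -> str:
--     if (current_status or "").lower() == FINAL_STATUS:
--         return FINAL_STATUS
--     # Classify each line into a three-value join-semilattice {completed, failed, mixed}
--     # ("mixed" absorbing), fold the joins, and read the order status off the final state.
--     def cls(i):
--         s = str(i.get("line_status") or "").lower()
--         if s == "completed":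
--             return "completed"
--         if s == "failed":
--             return "failed"
--         return "mixed"
--     state = None
--     for i in items:
--         c = cls(i)
--         state = c if state is None else (state if state == c else "mixed")
--     if state == "completed":
--         return "completed"
--     if state == "failed":
--         return "failed"
--     return "processing"
-- ===== Notes on version B (the rewrite author's own statement) =====
-- stated objective: alternative
-- what changed: Replaced the list build plus three short-circuiting all/any scans with a classify-then-fold over a three-value join-semilattice (completed/failed/mixed, mixed absorbing); the final lattice state alone determines the order status.
import Mathlib
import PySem

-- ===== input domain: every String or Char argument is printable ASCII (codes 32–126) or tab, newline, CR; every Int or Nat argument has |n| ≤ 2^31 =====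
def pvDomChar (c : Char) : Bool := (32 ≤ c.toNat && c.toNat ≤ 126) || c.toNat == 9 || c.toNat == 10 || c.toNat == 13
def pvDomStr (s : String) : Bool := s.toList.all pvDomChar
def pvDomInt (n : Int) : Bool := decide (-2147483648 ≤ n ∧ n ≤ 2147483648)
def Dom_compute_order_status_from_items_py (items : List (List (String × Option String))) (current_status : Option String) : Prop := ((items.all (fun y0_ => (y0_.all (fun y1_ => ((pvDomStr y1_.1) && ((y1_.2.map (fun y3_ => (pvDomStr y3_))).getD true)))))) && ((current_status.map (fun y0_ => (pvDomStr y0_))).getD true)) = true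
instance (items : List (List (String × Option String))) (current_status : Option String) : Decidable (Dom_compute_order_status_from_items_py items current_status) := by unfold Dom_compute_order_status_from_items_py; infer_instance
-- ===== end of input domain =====

-- B replaces A's list build plus three short-circuiting all/any scans with a classify-then-fold
-- over a three-value join-semilattice (completed/failed/mixed, mixed absorbing); alternative decomposition, same cost.


-- ===== PORT A =====
def pvLineStatus (i : List (String × Option String)) : String :=
  PySem.Str.lower ((((PySem.Dict.mk i).get? "line_status").join).getD "")

def compute_order_status_from_items_py (items : List (List (String × Option String))) (current_status : Option String) : String :=
  if PySem.Str.lower (current_status.getD "") == "completed" then "completed"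
  else
    let statuses := items.map pvLineStatus
    if statuses.isEmpty then "processing"
    else if statuses.all (fun s => s == "completed") then "completed"
    else if statuses.any (fun s => s == "processing") then "processing"
    else if statuses.all (fun s => s == "failed") then "failed"
    else "processing"

-- ===== PORT B =====
-- classify one line into the lattice {completed, failed, mixed}
def pvClass (i : List (String × Option String)) : String :=
  let s := pvLineStatus i
  if s == "completed" then "completed"
  else if s == "failed" then "failed"
  else "mixed"

def compute_order_status_from_items_py_alt (items : List (List (String × Option String))) (current_status : Option String) : String :=
  if PySem.Str.lower (current_status.getD "") == "completed" then "completed"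
  else
    let state := items.foldl (fun (st : Option String) i =>
      let c := pvClass i
      match st with
      | none => some c
      | some x => some (if x == c then x else "mixed")) none
    if state == some "completed" then "completed"
    else if state == some "failed" then "failed"
    else "processing"

-- ===== PRECONDITION & SPEC =====
def Spec_compute_order_status_from_items_py (items : List (List (String × Option String))) (current_status : Option String) (out : String) : Prop := out = compute_order_status_from_items_py_alt items current_status
instance (items : List (List (String × Option String))) (current_status : Option String) (out : String) : Decidable (Spec_compute_order_status_from_items_py items current_status out) := by unfold Spec_compute_order_status_from_items_py; infer_instance

-- ===== CLAIM (what is proved, stated in full; the proofs are below) =====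
def Claim_equal_compute_order_status_from_items_py : Prop := ∀ (items : List (List (String × Option String))) (current_status : Option String), Dom_compute_order_status_from_items_py items current_status → Spec_compute_order_status_from_items_py items current_status (compute_order_status_from_items_py items current_status)

-- ===== LEMMAS AND PROOFS =====

-- the join on bare strings ("mixed" need not be in the list's range)
def pvJoin (x c : String) : String := if x == c then x else "mixed"

lemma pvFold_some (m : List (List (String × Option String))) (a : String) :
    m.foldl (fun (st : Option String) i =>
      let c := pvClass i
      match st with
      | none => some c
      | some x => some (if x == c then x else "mixed")) (some a)
    = some (m.foldl (fun x i => pvJoin x (pvClass i)) a) := by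
  induction m generalizing a with
  | nil => rfl
  | cons i rest ih =>
      rw [List.foldl_cons, List.foldl_cons]
      exact ih (pvJoin a (pvClass i))

lemma pvFold_cons (i0 : List (String × Option String)) (rest : List (List (String × Option String))) :
    (i0 :: rest).foldl (fun (st : Option String) i =>
      let c := pvClass i
      match st with
      | none => some c
      | some x => some (if x == c then x else "mixed")) none
    = some (rest.foldl (fun x i => pvJoin x (pvClass i)) (pvClass i0)) := by
  rw [List.foldl_cons]
  exact pvFold_some rest (pvClass i0)

lemma pvJoinFold_eq (m : List (List (String × Option String))) (a t : String) (ht : t ≠ "mixed") :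
    m.foldl (fun x i => pvJoin x (pvClass i)) a = t ↔ a = t ∧ ∀ i ∈ m, pvClass i = t := by
  induction m generalizing a with
  | nil => simp
  | cons i rest ih =>
      rw [List.foldl_cons, ih, List.forall_mem_cons]
      unfold pvJoin
      by_cases h : (a == pvClass i) = true
      · have h' : a = pvClass i := by simpa using h
        subst h'
        simp only [h, if_true]
        tauto
      · have hb : (a == pvClass i) = false := by simpa using h
        have h' : a ≠ pvClass i := by simpa using h
        simp only [hb, Bool.false_eq_true, if_false]
        constructor
        · rintro ⟨h1, _⟩; exact absurd h1 (Ne.symm ht)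
        · rintro ⟨rfl, h2, _⟩; exact absurd h2.symm h'

lemma pvClass_eq_completed (i : List (String × Option String)) :
    pvClass i = "completed" ↔ pvLineStatus i = "completed" := by
  unfold pvClass
  by_cases h1 : pvLineStatus i == "completed"
  · simp_all
  · by_cases h2 : pvLineStatus i == "failed" <;> simp_all

lemma pvClass_eq_failed (i : List (String × Option String)) :
    pvClass i = "failed" ↔ pvLineStatus i = "failed" := by
  unfold pvClass
  by_cases h1 : pvLineStatus i == "completed"
  · simp_all
  · by_cases h2 : pvLineStatus i == "failed" <;> simp_all

-- ===== VERDICT (by name: the statement is the Claim_ definition above) =====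
theorem compute_order_status_from_items_py_spec : Claim_equal_compute_order_status_from_items_py := by
  intro items cs _
  unfold Spec_compute_order_status_from_items_py compute_order_status_from_items_py compute_order_status_from_items_py_alt
  by_cases hg : PySem.Str.lower (cs.getD "") == "completed"
  · simp [hg]
  · simp only [hg, Bool.false_eq_true, if_false]
    cases items with
    | nil => simp
    | cons i0 rest =>
        rw [pvFold_cons]
        set F := rest.foldl (fun x i => pvJoin x (pvClass i)) (pvClass i0) with hF
        have hC : F = "completed" ↔ ∀ j ∈ i0 :: rest, pvLineStatus j = "completed" := by
          rw [hF, pvJoinFold_eq _ _ _ (by decide), List.forall_mem_cons]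
          simp [pvClass_eq_completed]
        have hFa : F = "failed" ↔ ∀ j ∈ i0 :: rest, pvLineStatus j = "failed" := by
          rw [hF, pvJoinFold_eq _ _ _ (by decide), List.forall_mem_cons]
          simp [pvClass_eq_failed]
        by_cases hall : ∀ j ∈ i0 :: rest, pvLineStatus j = "completed"
        · obtain ⟨ha, hb⟩ := List.forall_mem_cons.1 hall
          simp [ha, hC.2 hall]
          exact hb
        · have hC' : F ≠ "completed" := fun h => hall (hC.1 h)
          have hallP : ¬(pvLineStatus i0 = "completed" ∧ ∀ x ∈ rest, pvLineStatus x = "completed") :=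
            fun h => hall (List.forall_mem_cons.2 h)
          by_cases hfail : ∀ j ∈ i0 :: rest, pvLineStatus j = "failed"
          · obtain ⟨fa, fb⟩ := List.forall_mem_cons.1 hfail
            have hnp2 : ¬ ∃ x ∈ rest, pvLineStatus x = "processing" := by
              rintro ⟨j, hj, hjp⟩
              rw [fb j hj] at hjp; exact absurd hjp (by decide)
            simp [hnp2, fa, hFa.2 hfail]
            exact fb
          · have hFa' : F ≠ "failed" := fun h => hfail (hFa.1 h)
            have hfailP : ¬(pvLineStatus i0 = "failed" ∧ ∀ x ∈ rest, pvLineStatus x = "failed") :=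
              fun h => hfail (List.forall_mem_cons.2 h)
            by_cases hp : (pvLineStatus i0 = "processing" ∨ ∃ x ∈ rest, pvLineStatus x = "processing")
            · simp [hallP, hp, hC', hFa']
            · simp [hallP, hp, hfailP, hC', hFa']
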